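-- pv_equiv track=rewrite | github.com/Pharallaxe/algorithms | ascii/montagne/montagne.py | montagne_detaillee
-- ===== SOURCE A (Python) =====
-- def montagne_detaillee(sommets):
--
--     paysage = []
--     max_el = max(sommets)
--     longueur = len(sommets)
--
--     for j in range(max_el + 1):
--         ligne = ""
--
--         for i in range(0, longueur):
--             el = sommets[i]
--             if el < j + 1:
--                 ligne += " " * (2 * el)
--             else:
--                 ligne += " " * j
--                 ligne += "/"
--                 ligne += " " * (2 * (el - j - 1))
--                 ligne += "\\" + " " * j
--
--         paysage.append(ligne.rstrip())
--
--     paysage = reversed(paysage)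
--     paysage = "\n".join(paysage)
--
--     return paysage
-- ===== SOURCE B (Python) =====
-- def montagne_detaillee(sommets):
--     max_el = max(sommets)
--
--     def bloc(el):
--         # this summit's rows, bottom level first, each exactly 2*el wide
--         for j in range(max_el + 1):
--             if j < el:
--                 yield (" " * j + "/" + " " * (2 * (el - j - 1)) + "\\").ljust(2 * el)
--             else:
--                 yield " " * (2 * el)
--
--     lignes = ["".join(morceaux).rstrip() for morceaux in zip(*(bloc(el) for el in sommets))]
--     lignes.reverse()
--     return "\n".join(lignes)
-- ===== Notes on version B (the rewrite author's own statement) =====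
-- stated objective: alternative
-- what changed: B renders each summit independently as its own block of rows (column-major) and then transposes the blocks with zip(*...) into lines, instead of A's row-major double loop concatenating segment strings per line; padding uses ljust instead of an explicit trailing-space formula.
import Mathlib
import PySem

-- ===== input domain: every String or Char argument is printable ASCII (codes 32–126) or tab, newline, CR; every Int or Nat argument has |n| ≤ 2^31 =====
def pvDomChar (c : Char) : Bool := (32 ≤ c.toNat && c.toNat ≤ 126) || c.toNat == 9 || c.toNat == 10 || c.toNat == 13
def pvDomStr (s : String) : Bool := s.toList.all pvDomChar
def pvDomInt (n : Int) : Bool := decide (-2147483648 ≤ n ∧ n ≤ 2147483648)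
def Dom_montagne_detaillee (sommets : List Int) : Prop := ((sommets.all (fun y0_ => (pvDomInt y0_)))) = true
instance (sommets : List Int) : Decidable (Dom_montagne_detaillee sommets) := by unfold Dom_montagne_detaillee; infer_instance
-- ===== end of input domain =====

-- B renders each summit as its own column block and transposes (zip) the blocks into rows,
-- instead of A's row-major double loop; objective: alternative decomposition, not faster.

-- " " * n  (empty for n ≤ 0, as in Python)
def spacesCh (n : Int) : List Char := List.replicate n.toNat ' '

-- ===== PORT A =====
def montagne_detaillee (sommets : List Int) : String :=
  -- max([]) raises ValueError: Pre_ excludes the empty list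
  match PySem.List.max? sommets (fun x => x) with
  | none => ""
  | some max_el =>
    let longueur := PySem.List.len sommets
    let paysage : List (List Char) :=
      (PySem.List.pyRange 0 (max_el + 1)).foldl (fun paysage j =>
        let ligne : List Char :=
          (PySem.List.pyRange 0 longueur).foldl (fun ligne i =>
            let el := PySem.List.pyGetD sommets i 0   -- i ∈ range(len(sommets)): always in range
            if el < j + 1 then
              ligne ++ spacesCh (2 * el)
            else
              ligne ++ spacesCh j ++ ['/'] ++ spacesCh (2 * (el - j - 1)) ++ (['\\'] ++ spacesCh j)) []
        paysage ++ [PySem.Chars.rstrip ligne]) []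
    String.ofList (PySem.Chars.join ['\n'] paysage.reverse)

-- ===== PORT B =====
-- s.ljust(w): pad on the right with spaces up to width w (unchanged if already that wide); exact
def ljustCh (cs : List Char) (w : Int) : List Char :=
  cs ++ List.replicate (w.toNat - cs.length) ' '

-- termination measure for pyZipStar (used by its decreasing_by)
theorem pvSumTailLt {α : Type} (ls : List (List α)) (h1 : ls ≠ []) (h2 : [] ∉ ls) :
    ((ls.map List.tail).map List.length).sum < (ls.map List.length).sum := by
  induction ls with
  | nil => cases h1 rfl
  | cons hd t _ =>
    have hhd : hd ≠ [] := fun e => h2 (by simp [e])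
    have h3 : hd.tail.length < hd.length := by
      cases hd with
      | nil => cases hhd rfl
      | cons a b => simp
    have ht : ((t.map List.tail).map List.length).sum ≤ (t.map List.length).sum := by
      rw [List.map_map]
      exact List.sum_le_sum (fun l _ => by simp [List.length_tail])
    simp only [List.map_cons, List.sum_cons]
    omega

-- zip(*ls): tuples of heads while every list is nonempty (zip of no iterables is empty)
def pyZipStar {α : Type} (ls : List (List α)) : List (List α) :=
  if h : ls.isEmpty || ls.any List.isEmpty then []
  else ls.filterMap List.head? :: pyZipStar (ls.map List.tail)
termination_by (ls.map List.length).sum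
decreasing_by
  have h' : ¬ls.isEmpty = true ∧ ¬ls.any List.isEmpty = true := by
    constructor <;> intro hx <;> exact h (by simp [hx])
  exact pvSumTailLt ls (by simpa [List.isEmpty_iff] using h'.1)
    (fun hm => h'.2 (List.any_eq_true.mpr ⟨[], hm, by simp⟩))

def blocCh (max_el el : Int) : List (List Char) :=
  (PySem.List.pyRange 0 (max_el + 1)).foldl (fun rows j =>
    rows ++ [ if j < el then
                ljustCh (spacesCh j ++ ['/'] ++ spacesCh (2 * (el - j - 1)) ++ ['\\']) (2 * el)
              else spacesCh (2 * el) ]) []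

def montagne_detaillee_alt (sommets : List Int) : String :=
  -- max([]) raises ValueError: Pre_ excludes the empty list
  match PySem.List.max? sommets (fun x => x) with
  | none => ""
  | some max_el =>
    let blocs := sommets.map (blocCh max_el)
    let lignes := (pyZipStar blocs).map (fun morceaux => PySem.Chars.rstrip (PySem.Chars.join [] morceaux))
    String.ofList (PySem.Chars.join ['\n'] lignes.reverse)

-- ===== PRECONDITION & SPEC =====
-- Pre_ excludes only the empty list, on which A's max(sommets) raises ValueError
def Pre_montagne_detaillee (sommets : List Int) : Prop := sommets ≠ []
instance (sommets : List Int) : Decidable (Pre_montagne_detaillee sommets) := by unfold Pre_montagne_detaillee; infer_instance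
def pvWitness_montagne_detaillee : List Int := [3, 1, 2]

def Spec_montagne_detaillee (sommets : List Int) (out : String) : Prop := out = montagne_detaillee_alt sommets
instance (sommets : List Int) (out : String) : Decidable (Spec_montagne_detaillee sommets out) := by unfold Spec_montagne_detaillee; infer_instance

-- ===== CLAIM (what is proved, stated in full; the proofs are below) =====
def Claim_equal_montagne_detaillee : Prop := ∀ (sommets : List Int), Dom_montagne_detaillee sommets → Pre_montagne_detaillee sommets → Spec_montagne_detaillee sommets (montagne_detaillee sommets)

-- ===== LEMMAS AND PROOFS =====

-- A's segment for summit el on level j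
def segACh (j el : Int) : List Char :=
  if el < j + 1 then spacesCh (2 * el)
  else spacesCh j ++ ['/'] ++ spacesCh (2 * (el - j - 1)) ++ (['\\'] ++ spacesCh j)

theorem join_nil_eq_flatten (parts : List (List Char)) : PySem.Chars.join [] parts = parts.flatten := by
  induction parts with
  | nil => rfl
  | cons h t ih => cases t <;> simp_all [PySem.Chars.join, List.intercalate, List.intersperse]

-- B's block entry equals A's segment on levels j ≥ 0
theorem seg_eq (j el : Int) (hj : 0 ≤ j) :
    (if j < el then ljustCh (spacesCh j ++ ['/'] ++ spacesCh (2 * (el - j - 1)) ++ ['\\']) (2 * el)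
     else spacesCh (2 * el)) = segACh j el := by
  unfold segACh ljustCh spacesCh
  by_cases hc : j < el
  · have hc2 : ¬ el < j + 1 := by omega
    have hpad : (2 * el).toNat -
        (List.replicate j.toNat ' ' ++ (['/'] ++ (List.replicate (2 * (el - j - 1)).toNat ' ' ++ ['\\']))).length
        = j.toNat := by
      simp [List.length_append]; omega
    simp only [if_pos hc, if_neg hc2, List.append_assoc, hpad]
  · have hc2 : el < j + 1 := by omega
    rw [if_neg hc, if_pos hc2]

-- A's inner loop over the summit indices is a flatMap of per-summit segments
theorem foldA (sommets : List Int) (j : Int) :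
    (PySem.List.pyRange 0 (PySem.List.len sommets)).foldl (fun ligne i =>
      let el := PySem.List.pyGetD sommets i 0
      if el < j + 1 then
        ligne ++ spacesCh (2 * el)
      else
        ligne ++ spacesCh j ++ ['/'] ++ spacesCh (2 * (el - j - 1)) ++ (['\\'] ++ spacesCh j)) []
    = sommets.flatMap (segACh j) := by
  rw [show (fun (ligne : List Char) (i : Int) =>
      let el := PySem.List.pyGetD sommets i 0
      if el < j + 1 then
        ligne ++ spacesCh (2 * el)
      else
        ligne ++ spacesCh j ++ ['/'] ++ spacesCh (2 * (el - j - 1)) ++ (['\\'] ++ spacesCh j))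
    = fun ligne i => (fun (acc : List Char) (el : Int) => acc ++ segACh j el) ligne
        (PySem.List.pyGetD sommets i 0) from by
      funext ligne i
      show _ = ligne ++ segACh j (PySem.List.pyGetD sommets i 0)
      unfold segACh; split <;> rename_i hcnd <;> simp [hcnd, List.append_assoc]]
  rw [PySem.List.foldl_pyRange_zero_pyGetD sommets 0 (fun acc el => acc ++ segACh j el) []]
  rw [PySem.List.foldl_append_eq_flatMap]
  simp

-- A's value in the some-max case
theorem A_eq (sommets : List Int) (m : Int) (h : PySem.List.max? sommets (fun x => x) = some m) :
    montagne_detaillee sommets =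
      String.ofList (PySem.Chars.join ['\n']
        (((PySem.List.pyRange 0 (m + 1)).map
            (fun j => PySem.Chars.rstrip (sommets.flatMap (segACh j)))).reverse)) := by
  simp only [montagne_detaillee, h]
  simp only [foldA, PySem.List.foldl_append_singleton_eq_map, List.nil_append]

-- zip(*·) of blocks that are all maps over the same level list transposes them
theorem pyZipStar_map {α β : Type} (js : List Int) (xs : List α) (g : α → Int → List β) (hxs : xs ≠ []) :
    pyZipStar (xs.map (fun x => js.map (g x))) = js.map (fun j => xs.map (fun x => g x j)) := by
  induction js with
  | nil =>
    obtain ⟨x, xs', rfl⟩ := List.exists_cons_of_ne_nil hxs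
    rw [pyZipStar]
    simp
  | cons j js' ih =>
    rw [pyZipStar]
    rw [dif_neg (by
      obtain ⟨x, xs', rfl⟩ := List.exists_cons_of_ne_nil hxs
      simp)]
    simp only [List.filterMap_map, List.map_map, Function.comp_def, List.head?_cons,
      List.tail_cons, List.map_cons]
    rw [show (fun x => (some (g x j) : Option (List β))) = fun x => some (g x j) from rfl]
    simp only [List.filterMap_eq_map']
    rw [ih]

-- B's value in the some-max case
theorem B_eq (sommets : List Int) (m : Int) (h : PySem.List.max? sommets (fun x => x) = some m)
    (hne : sommets ≠ []) :
    montagne_detaillee_alt sommets =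
      String.ofList (PySem.Chars.join ['\n']
        (((PySem.List.pyRange 0 (m + 1)).map
            (fun j => PySem.Chars.rstrip (sommets.flatMap (segACh j)))).reverse)) := by
  simp only [montagne_detaillee_alt, h]
  have hbloc : blocCh m = fun el => (PySem.List.pyRange 0 (m + 1)).map (fun j =>
      if j < el then ljustCh (spacesCh j ++ ['/'] ++ spacesCh (2 * (el - j - 1)) ++ ['\\']) (2 * el)
      else spacesCh (2 * el)) := by
    funext el
    unfold blocCh
    rw [PySem.List.foldl_append_singleton_eq_map]
    simp
  simp only [hbloc]
  rw [pyZipStar_map _ _ _ hne]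
  congr 2
  rw [List.map_map]
  simp only [Function.comp_def]
  congr 1
  refine List.map_congr_left (fun j hj => ?_)
  have hj0 : 0 ≤ j := (PySem.List.mem_pyRange_one.mp hj).1
  rw [join_nil_eq_flatten]
  congr 1
  rw [List.map_congr_left (fun el (_ : el ∈ sommets) => seg_eq j el hj0)]
  exact List.flatMap_def.symm

-- ===== VERDICT (by name: the statement is the Claim_ definition above) =====
theorem montagne_detaillee_spec : Claim_equal_montagne_detaillee := by
  intro sommets _ hpre
  unfold Spec_montagne_detaillee
  cases h : PySem.List.max? sommets (fun x => x) with
  | none => exact absurd ((PySem.List.max?_eq_none_iff sommets _).mp h) hpre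
  | some m => rw [A_eq sommets m h, B_eq sommets m h hpre]
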